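-- pv_equiv track=rewrite | github.com/peekxc/spirit | src/spirit/query.py | invert_dfs_box
-- ===== SOURCE A (Python) =====
-- def invert_dfs_box(n: int, index: int):
-- 	"""Returns the box (i, mid-left, mid-right, j) for a given DFS index."""
-- 	left, right = 0, n - 1
-- 	path = []
-- 	while index > 0:
-- 		path.append(index % 2)  # Track left (1) or right (0)
-- 		index = (index - 1) // 2  # Move to parent
-- 	path.reverse()  # Start from root downwards
-- 	while path:
-- 		mid = (left + right) // 2
-- 		if path.pop(0) == 0:  # Right child
-- 			left = mid
-- 		else:  # Left child
-- 			right = mid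
-- 	mid = (left + right) // 2
-- 	return (left, mid, mid, right)
-- ===== SOURCE B (Python) =====
-- def _lr(n, index):
--     """Box (left, right) for DFS index, by recursing up the parent chain."""
--     if index <= 0:
--         return (0, n - 1)
--     left, right = _lr(n, (index - 1) // 2)
--     mid = (left + right) // 2
--     if index % 2 == 1:   # left child
--         return (left, mid)
--     else:                # right child
--         return (mid, right)
--
-- def invert_dfs_box(n: int, index: int):
--     """Returns the box (i, mid-left, mid-right, j) for a given DFS index."""
--     left, right = _lr(n, index)
--     mid = (left + right) // 2
--     return (left, mid, mid, right)
-- ===== Notes on version B (the rewrite author's own statement) =====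
-- stated objective: simpler
-- what changed: Replaces the explicit bit-path list and the two while-loops with a single direct recursion up the parent chain that refines (left,right) on the way back down, keeping the path on the call stack.
import Mathlib
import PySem

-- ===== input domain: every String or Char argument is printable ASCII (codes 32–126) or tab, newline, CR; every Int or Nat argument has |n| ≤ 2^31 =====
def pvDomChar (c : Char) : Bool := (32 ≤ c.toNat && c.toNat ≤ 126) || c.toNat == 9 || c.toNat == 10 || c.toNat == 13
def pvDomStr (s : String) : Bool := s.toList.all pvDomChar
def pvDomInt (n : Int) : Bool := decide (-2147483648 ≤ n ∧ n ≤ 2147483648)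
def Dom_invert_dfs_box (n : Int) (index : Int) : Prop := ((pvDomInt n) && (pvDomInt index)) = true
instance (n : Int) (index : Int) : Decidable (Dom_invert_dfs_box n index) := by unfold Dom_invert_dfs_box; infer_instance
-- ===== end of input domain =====

-- B replaces A's explicit bit-path list and two while-loops with one recursion up
-- the parent chain (simpler decomposition, same cost); A = B proved for all inputs.


-- ===== PORT A =====
-- first while-loop: collect index % 2 while index > 0, moving to the parent
def pvBuildPath (index : Int) : List Int :=
  if h : index > 0 then
    PySem.Int.mod index 2 :: pvBuildPath (PySem.Int.floordiv (index - 1) 2)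
  else []
termination_by index.toNat
decreasing_by
  have h2 : PySem.Int.floordiv (index - 1) 2 = (index - 1) / 2 :=
    PySem.Int.floordiv_eq_ediv_of_pos (by omega)
  rw [h2]; omega

-- second while-loop: pop from the front, shrinking (left, right)
def pvApplyPath : List Int → Int → Int → Int × Int
  | [], left, right => (left, right)
  | p :: rest, left, right =>
    let mid := PySem.Int.floordiv (left + right) 2
    if p = 0 then pvApplyPath rest mid right else pvApplyPath rest left mid

def invert_dfs_box (n : Int) (index : Int) : Int × Int × Int × Int :=
  let path := (pvBuildPath index).reverse
  let lr := pvApplyPath path 0 (n - 1)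
  let mid := PySem.Int.floordiv (lr.1 + lr.2) 2
  (lr.1, mid, mid, lr.2)

-- ===== PORT B =====
-- _lr: recursion up the parent chain
def pvLr (n : Int) (index : Int) : Int × Int :=
  if h : index ≤ 0 then (0, n - 1)
  else
    let lr := pvLr n (PySem.Int.floordiv (index - 1) 2)
    let mid := PySem.Int.floordiv (lr.1 + lr.2) 2
    if PySem.Int.mod index 2 = 1 then (lr.1, mid) else (mid, lr.2)
termination_by index.toNat
decreasing_by
  have h2 : PySem.Int.floordiv (index - 1) 2 = (index - 1) / 2 :=
    PySem.Int.floordiv_eq_ediv_of_pos (by omega)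
  rw [h2]; omega

def invert_dfs_box_alt (n : Int) (index : Int) : Int × Int × Int × Int :=
  let lr := pvLr n index
  let mid := PySem.Int.floordiv (lr.1 + lr.2) 2
  (lr.1, mid, mid, lr.2)

-- ===== PRECONDITION & SPEC =====
def Spec_invert_dfs_box (n : Int) (index : Int) (out : Int × Int × Int × Int) : Prop := out = invert_dfs_box_alt n index
instance (n : Int) (index : Int) (out : Int × Int × Int × Int) : Decidable (Spec_invert_dfs_box n index out) := by unfold Spec_invert_dfs_box; infer_instance

-- ===== CLAIM (what is proved, stated in full; the proofs are below) =====
def Claim_equal_invert_dfs_box : Prop := ∀ (n : Int) (index : Int), Dom_invert_dfs_box n index → Spec_invert_dfs_box n index (invert_dfs_box n index)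

-- ===== LEMMAS AND PROOFS =====
-- one refinement step of the two matching branch bodies
def pvStep (p : Int) (lr : Int × Int) : Int × Int :=
  let mid := PySem.Int.floordiv (lr.1 + lr.2) 2
  if p = 0 then (mid, lr.2) else (lr.1, mid)

-- applying a path with one extra step appended applies that step last
theorem pvApplyPath_append_singleton (xs : List Int) (p left right : Int) :
    pvApplyPath (xs ++ [p]) left right = pvStep p (pvApplyPath xs left right) := by
  induction xs generalizing left right with
  | nil => simp [pvApplyPath, pvStep]
  | cons q rest ih =>
      simp only [List.cons_append, pvApplyPath]
      split_ifs <;> exact ih _ _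

-- replaying A's reversed path from the root equals B's parent-chain recursion
theorem pvApplyPath_buildPath (index n : Int) :
    pvApplyPath (pvBuildPath index).reverse 0 (n - 1) = pvLr n index := by
  induction index using pvBuildPath.induct with
  | case1 index h ih =>
      rw [pvBuildPath]
      simp only [h, dite_true, List.reverse_cons, pvApplyPath_append_singleton, ih]
      conv_rhs => rw [pvLr, dif_neg (by omega : ¬ index ≤ 0)]
      generalize pvLr n (PySem.Int.floordiv (index - 1) 2) = lr
      rcases Int.emod_two_eq_zero_or_one index with h0 | h1
      · simp [pvStep, PySem.Int.mod_eq_emod_of_pos, h0]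
      · simp [pvStep, PySem.Int.mod_eq_emod_of_pos, h1]
  | case2 index h =>
      rw [pvBuildPath]
      simp only [h, dite_false, List.reverse_nil, pvApplyPath]
      rw [pvLr]
      simp [show index ≤ 0 by omega]

-- ===== VERDICT (by name: the statement is the Claim_ definition above) =====
theorem invert_dfs_box_spec : Claim_equal_invert_dfs_box := by
  intro n index _
  unfold Spec_invert_dfs_box
  simp only [invert_dfs_box, invert_dfs_box_alt, pvApplyPath_buildPath]
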